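-- pv_equiv track=rewrite | github.com/thanhlexyz/bound_conv2d | tool/conv2d_wedge.py | _infer_unfold_params
-- ===== SOURCE A (Python) =====
-- def _infer_unfold_params(Hin, Win, Kh, Kw):
--     '''
--     Heuristically infer unfold parameters when no Conv attribute is available.
--
--     Searches stride ``∈ [1, 4]``, padding ``∈ [0, 4]`` (with unit dilation)
--     for combinations that yield a positive output spatial size, then picks
--     the combination whose output size is closest to half the input size.
--
--     Parameters
--     ----------
--     Hin : int
--         Input height.
--     Win : int
--         Input width.
--     Kh : int
--         Kernel height.
--     Kw : int
--         Kernel width.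
--
--     Returns
--     -------
--     padding : tuple of int
--         ``(pad_h, pad_w)``.
--     stride : tuple of int
--         ``(stride_h, stride_w)``.
--     dilation : tuple of int
--         Always ``(1, 1)``.
--
--     Raises
--     ------
--     RuntimeError
--         If no valid combination of parameters is found.
--     '''
--     dilation = (1, 1)
--     tried = []
--     for sh in range(1, 5):
--         for sw in range(1, 5):
--             for ph in range(0, 5):
--                 for pw in range(0, 5):
--                     oh = (Hin + 2 * ph - dilation[0] * (Kh - 1) - 1) // sh + 1
--                     ow = (Win + 2 * pw - dilation[1] * (Kw - 1) - 1) // sw + 1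
--                     if oh < 1 or ow < 1:
--                         continue
--                     tried.append(((ph, pw), (sh, sw), dilation, oh, ow))
--     if not tried:
--         raise RuntimeError(
--             f'Cannot infer unfold params for spatial ({Hin},{Win}), kernel ({Kh},{Kw})'
--         )
--     tried.sort(
--         key=lambda t: abs(t[3] - Hin // 2) + abs(t[4] - Win // 2)
--     )
--     ph_pw, st, dil, _, _ = tried[0]
--     return ph_pw, st, dil
-- ===== SOURCE B (Python) =====
-- def _infer_unfold_params(Hin, Win, Kh, Kw):
--     '''Per-axis single-pass argmin: the distance |oh - Hin//2| + |ow - Win//2|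
--     splits into independent height and width terms, so the best (stride, pad)
--     is found for each axis separately (2 * 20 combos instead of 400 + a sort).'''
--     def best_axis(size, k):
--         target = size // 2
--         best = None  # (dist, stride, pad)
--         for s in range(1, 5):
--             for p in range(0, 5):
--                 o = (size + 2 * p - k) // s + 1
--                 if o < 1:
--                     continue
--                 d = abs(o - target)
--                 if best is None or d < best[0]:
--                     best = (d, s, p)
--         return best
--
--     bh = best_axis(Hin, Kh)
--     bw = best_axis(Win, Kw)
--     if bh is None or bw is None:
--         raise RuntimeError(
--             f'Cannot infer unfold params for spatial ({Hin},{Win}), kernel ({Kh},{Kw})'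
--         )
--     return (bh[2], bw[2]), (bh[1], bw[1]), (1, 1)
-- ===== Notes on version B (the rewrite author's own statement) =====
-- stated objective: faster
-- what changed: A enumerates all 400 (stride_h, stride_w, pad_h, pad_w) combinations, builds a list and stably sorts it by |oh - Hin//2| + |ow - Win//2|; B exploits that this distance is a sum of an independent height term and width term, so it runs two separate 20-combination single-pass argmins (strict-< update, first minimizer wins) and combines the per-axis winners, with no list and no sort.
import Mathlib
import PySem

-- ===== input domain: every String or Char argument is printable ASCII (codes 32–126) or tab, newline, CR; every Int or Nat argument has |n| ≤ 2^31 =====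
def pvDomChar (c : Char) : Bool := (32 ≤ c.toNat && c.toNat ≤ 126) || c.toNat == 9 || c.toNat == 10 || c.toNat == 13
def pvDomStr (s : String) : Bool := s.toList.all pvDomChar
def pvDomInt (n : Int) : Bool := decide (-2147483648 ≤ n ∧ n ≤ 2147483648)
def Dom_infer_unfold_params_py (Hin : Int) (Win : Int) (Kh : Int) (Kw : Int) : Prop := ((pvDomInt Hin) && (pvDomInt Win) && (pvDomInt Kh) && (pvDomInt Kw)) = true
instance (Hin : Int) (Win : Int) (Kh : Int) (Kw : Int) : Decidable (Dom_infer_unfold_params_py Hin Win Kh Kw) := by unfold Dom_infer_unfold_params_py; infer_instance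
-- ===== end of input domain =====

-- B replaces A's build-all-400-combos-then-stable-sort search by two independent
-- per-axis single-pass argmins (the distance is a sum of a height-only and a
-- width-only term); objective: faster by a constant factor (no 400-element list, no sort).

-- ===== PORT A =====
def infer_unfold_params_py (Hin : Int) (Win : Int) (Kh : Int) (Kw : Int) :
    (Int × Int) × (Int × Int) × (Int × Int) :=
  let dilation : Int × Int := (1, 1)
  let tried : List ((Int × Int) × (Int × Int) × (Int × Int) × Int × Int) :=
    (PySem.List.pyRange 1 5 1).foldl (fun acc sh =>
      (PySem.List.pyRange 1 5 1).foldl (fun acc sw =>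
        (PySem.List.pyRange 0 5 1).foldl (fun acc ph =>
          (PySem.List.pyRange 0 5 1).foldl (fun acc pw =>
            let oh := PySem.Int.floordiv (Hin + 2 * ph - dilation.1 * (Kh - 1) - 1) sh + 1
            let ow := PySem.Int.floordiv (Win + 2 * pw - dilation.2 * (Kw - 1) - 1) sw + 1
            if oh < 1 ∨ ow < 1 then acc
            else acc ++ [((ph, pw), (sh, sw), dilation, oh, ow)]) acc) acc) acc) []
  match PySem.List.sorted tried
      (fun t => |t.2.2.2.1 - PySem.Int.floordiv Hin 2| + |t.2.2.2.2 - PySem.Int.floordiv Win 2|) with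
  | [] => ((0, 0), (0, 0), (0, 0))   -- Python raises RuntimeError here; excluded by Pre_
  | t :: _ => (t.1, t.2.1, t.2.2.1)

-- ===== PORT B =====
-- B-side helper: per-axis single-pass argmin over stride ∈ [1,4], pad ∈ [0,4]
def pvBestAxis (size : Int) (k : Int) : Option (Int × Int × Int) :=
  let target := PySem.Int.floordiv size 2
  (PySem.List.pyRange 1 5 1).foldl (fun best s =>
    (PySem.List.pyRange 0 5 1).foldl (fun best p =>
      let o := PySem.Int.floordiv (size + 2 * p - k) s + 1
      if o < 1 then best
      else
        let d := |o - target|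
        match best with
        | none => some (d, s, p)
        | some b => if d < b.1 then some (d, s, p) else best) best) none

def infer_unfold_params_py_alt (Hin : Int) (Win : Int) (Kh : Int) (Kw : Int) :
    (Int × Int) × (Int × Int) × (Int × Int) :=
  match pvBestAxis Hin Kh, pvBestAxis Win Kw with
  | some bh, some bw => ((bh.2.2, bw.2.2), (bh.2.1, bw.2.1), (1, 1))
  | _, _ => ((0, 0), (0, 0), (0, 0))   -- Python raises RuntimeError here; excluded by Pre_

-- ===== PRECONDITION & SPEC =====
-- Pre_ excludes exactly the inputs where A (and B) raise RuntimeError: no stride/pad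
-- combination gives a positive output size, i.e. Hin + 8 < Kh or Win + 8 < Kw.
def Pre_infer_unfold_params_py (Hin : Int) (Win : Int) (Kh : Int) (Kw : Int) : Prop :=
  Kh ≤ Hin + 8 ∧ Kw ≤ Win + 8
instance (Hin : Int) (Win : Int) (Kh : Int) (Kw : Int) : Decidable (Pre_infer_unfold_params_py Hin Win Kh Kw) := by unfold Pre_infer_unfold_params_py; infer_instance

def pvWitness_infer_unfold_params_py : Int × Int × Int × Int := (8, 8, 3, 3)

def Spec_infer_unfold_params_py (Hin : Int) (Win : Int) (Kh : Int) (Kw : Int)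
    (out : (Int × Int) × (Int × Int) × (Int × Int)) : Prop :=
  out = infer_unfold_params_py_alt Hin Win Kh Kw
instance (Hin : Int) (Win : Int) (Kh : Int) (Kw : Int) (out : (Int × Int) × (Int × Int) × (Int × Int)) : Decidable (Spec_infer_unfold_params_py Hin Win Kh Kw out) := by unfold Spec_infer_unfold_params_py; infer_instance

-- ===== CLAIM (what is proved, stated in full; the proofs are below) =====
def Claim_equal_infer_unfold_params_py : Prop := ∀ (Hin : Int) (Win : Int) (Kh : Int) (Kw : Int), Dom_infer_unfold_params_py Hin Win Kh Kw → Pre_infer_unfold_params_py Hin Win Kh Kw → Spec_infer_unfold_params_py Hin Win Kh Kw (infer_unfold_params_py Hin Win Kh Kw)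

-- ===== LEMMAS AND PROOFS =====

-- abbreviation for A's tuple type ((ph,pw),(sh,sw),dilation,oh,ow)
abbrev pvT : Type := (Int × Int) × (Int × Int) × (Int × Int) × Int × Int

-- output size along one axis, its distance to half the input, validity of a pad
def pvO (size k s p : Int) : Int := PySem.Int.floordiv (size + 2 * p - 1 * (k - 1) - 1) s + 1
def pvD (size k s p : Int) : Int := |pvO size k s p - PySem.Int.floordiv size 2|
def pvVP (size k : Int) : List Int :=
  ([0, 1, 2, 3, 4] : List Int).filter (fun p => decide (0 ≤ size + 2 * p - 1 * (k - 1) - 1))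

def pvMk (Hin Win Kh Kw sh sw ph pw : Int) : pvT :=
  ((ph, pw), (sh, sw), (1, 1), pvO Hin Kh sh ph, pvO Win Kw sw pw)

def pvBlockW (Hin Win Kh Kw sh sw ph : Int) : List pvT :=
  (pvVP Win Kw).map fun pw => pvMk Hin Win Kh Kw sh sw ph pw

def pvBlockPh (Hin Win Kh Kw sh sw : Int) : List pvT :=
  (pvVP Hin Kh).flatMap (pvBlockW Hin Win Kh Kw sh sw)

def pvBlockSw (Hin Win Kh Kw sh : Int) : List pvT :=
  ([1, 2, 3, 4] : List Int).flatMap (pvBlockPh Hin Win Kh Kw sh)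

def pvTried (Hin Win Kh Kw : Int) : List pvT :=
  ([1, 2, 3, 4] : List Int).flatMap (pvBlockSw Hin Win Kh Kw)

def pvKeyA (Hin Win : Int) (t : pvT) : Int :=
  |t.2.2.2.1 - PySem.Int.floordiv Hin 2| + |t.2.2.2.2 - PySem.Int.floordiv Win 2|

def pvItems (size k : Int) : List (Int × Int × Int) :=
  ([1, 2, 3, 4] : List Int).flatMap fun s =>
    (pvVP size k).map fun p => (pvD size k s p, s, p)

-- first-minimum fold (keeps the earlier element on ties)
def pvStep {α : Type} (key : α → Int) (b : Option α) (x : α) : Option α :=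
  match b with
  | none => some x
  | some m => if key x < key m then some x else b

def pvFM {α : Type} (key : α → Int) (xs : List α) : Option α := xs.foldl (pvStep key) none

-- lexicographic "comes strictly earlier in the loop order" relations
def pvRax (a b : Int × Int × Int) : Prop :=
  a.2.1 < b.2.1 ∨ (a.2.1 = b.2.1 ∧ a.2.2 < b.2.2)

def pvR4 (a b : pvT) : Prop :=
  a.2.1.1 < b.2.1.1 ∨ (a.2.1.1 = b.2.1.1 ∧ (a.2.1.2 < b.2.1.2 ∨ (a.2.1.2 = b.2.1.2 ∧
    (a.1.1 < b.1.1 ∨ (a.1.1 = b.1.1 ∧ a.1.2 < b.1.2)))))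

-- ---- generic fold-shape lemmas ----

theorem pv_foldl_of_append {α β : Type} (xs : List α) (f : List β → α → List β) (g : α → List β)
    (h : ∀ acc x, x ∈ xs → f acc x = acc ++ g x) :
    ∀ acc, xs.foldl f acc = acc ++ xs.flatMap g := by
  induction xs with
  | nil => simp
  | cons x t ih =>
    intro acc
    rw [List.foldl_cons, h acc x (by simp), ih (fun a y hy => h a y (by simp [hy])),
      List.flatMap_cons, List.append_assoc]

theorem pv_foldl_of_blocks {α β γ : Type} (xs : List α) (f : γ → α → γ) (g : α → List β)
    (st : γ → β → γ) (h : ∀ b x, x ∈ xs → f b x = (g x).foldl st b) :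
    ∀ b, xs.foldl f b = (xs.flatMap g).foldl st b := by
  induction xs with
  | nil => simp
  | cons x t ih =>
    intro b
    rw [List.foldl_cons, h b x (by simp), List.flatMap_cons, List.foldl_append,
      ih (fun b' y hy => h b' y (by simp [hy]))]

theorem pv_foldl_guard {α γ : Type} (xs : List α) (f : γ → α → γ) (c : α → Prop)
    [DecidablePred c] (st : γ → α → γ)
    (h : ∀ b x, x ∈ xs → f b x = if c x then st b x else b) :
    ∀ b, xs.foldl f b = (xs.filter (fun x => decide (c x))).foldl st b := by
  induction xs with
  | nil => simp
  | cons x t ih =>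
    intro b
    rw [List.foldl_cons, h b x (by simp)]
    by_cases hc : c x
    · rw [if_pos hc, List.filter_cons_of_pos (by simpa using hc), List.foldl_cons,
        ih (fun b' y hy => h b' y (by simp [hy]))]
    · rw [if_neg hc, List.filter_cons_of_neg (by simpa using hc),
        ih (fun b' y hy => h b' y (by simp [hy]))]

theorem pv_flatMap_guard {α β : Type} (xs : List α) (c : α → Prop) [DecidablePred c]
    (f : α → List β) :
    (xs.flatMap fun x => if c x then f x else []) = (xs.filter (fun x => decide (c x))).flatMap f := by
  induction xs with
  | nil => simp
  | cons x t ih =>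
    by_cases hc : c x
    · rw [List.flatMap_cons, if_pos hc, List.filter_cons_of_pos (by simpa using hc),
        List.flatMap_cons, ih]
    · rw [List.flatMap_cons, if_neg hc, List.filter_cons_of_neg (by simpa using hc),
        List.nil_append, ih]

-- ---- first-minimum lemmas ----

theorem pvFM_cont {α : Type} (key : α → Int) :
    ∀ (xs : List α) (m : α), (∀ y ∈ xs, key m ≤ key y) →
      xs.foldl (pvStep key) (some m) = some m := by
  intro xs
  induction xs with
  | nil => intro m _; rfl
  | cons x t ih =>
    intro m h
    have hx : ¬ key x < key m := not_lt.2 (h x (by simp))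
    simp only [List.foldl_cons, pvStep, if_neg hx]
    exact ih m (fun y hy => h y (by simp [hy]))

theorem pvFM_isSome {α : Type} (key : α → Int) :
    ∀ (xs : List α) (a : α), ∃ r, xs.foldl (pvStep key) (some a) = some r := by
  intro xs
  induction xs with
  | nil => intro a; exact ⟨a, rfl⟩
  | cons x t ih =>
    intro a
    simp only [List.foldl_cons, pvStep]
    by_cases h : key x < key a
    · simpa [h] using ih x
    · simpa [h] using ih a

theorem pvFMU_aux {α : Type} (key : α → Int) (R : α → α → Prop) :
    ∀ (xs : List α) (a m : α), xs.Pairwise R → m ∈ xs →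
      (∀ y ∈ xs, key m ≤ key y) → (∀ y ∈ xs, R y m → key m < key y) → key m < key a →
      xs.foldl (pvStep key) (some a) = some m := by
  intro xs
  induction xs with
  | nil => intro a m _ hm; simp at hm
  | cons x t ih =>
    intro a m hp hm hmin hfirst ha
    by_cases hx : x = m
    · subst hx
      simp only [List.foldl_cons, pvStep, if_pos ha]
      exact pvFM_cont key t x (fun y hy => hmin y (by simp [hy]))
    · have hmt : m ∈ t := (List.mem_cons.1 hm).resolve_left (fun e => hx e.symm)
      have hRxm : R x m := (List.pairwise_cons.1 hp).1 m hmt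
      have hkx : key m < key x := hfirst x (by simp) hRxm
      simp only [List.foldl_cons, pvStep]
      by_cases hxa : key x < key a
      · rw [if_pos hxa]
        exact ih x m (List.pairwise_cons.1 hp).2 hmt (fun y hy => hmin y (by simp [hy]))
          (fun y hy => hfirst y (by simp [hy])) hkx
      · rw [if_neg hxa]
        exact ih a m (List.pairwise_cons.1 hp).2 hmt (fun y hy => hmin y (by simp [hy]))
          (fun y hy => hfirst y (by simp [hy])) ha

theorem pvFMU {α : Type} (key : α → Int) (R : α → α → Prop) (xs : List α) (m : α)
    (hp : xs.Pairwise R) (hm : m ∈ xs) (hmin : ∀ y ∈ xs, key m ≤ key y)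
    (hfirst : ∀ y ∈ xs, R y m → key m < key y) :
    pvFM key xs = some m := by
  cases xs with
  | nil => simp at hm
  | cons x t =>
    show (x :: t).foldl (pvStep key) none = some m
    simp only [List.foldl_cons, pvStep]
    by_cases hx : x = m
    · subst hx
      exact pvFM_cont key t x (fun y hy => hmin y (by simp [hy]))
    · have hmt : m ∈ t := (List.mem_cons.1 hm).resolve_left (fun e => hx e.symm)
      have hRxm : R x m := (List.pairwise_cons.1 hp).1 m hmt
      have hkx : key m < key x := hfirst x (by simp) hRxm
      exact pvFMU_aux key R t x m (List.pairwise_cons.1 hp).2 hmt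
        (fun y hy => hmin y (by simp [hy])) (fun y hy => hfirst y (by simp [hy])) hkx

theorem pvFME_aux {α : Type} (key : α → Int) :
    ∀ (xs : List α) (a r : α), xs.foldl (pvStep key) (some a) = some r →
      (r = a ∧ ∀ y ∈ xs, key a ≤ key y) ∨
      (r ∈ xs ∧ key r < key a ∧ (∀ y ∈ xs, key r ≤ key y) ∧
        ∃ l1 l2, xs = l1 ++ r :: l2 ∧ ∀ y ∈ l1, key r < key y) := by
  intro xs
  induction xs with
  | nil =>
    intro a r h
    left
    exact ⟨(Option.some.inj h).symm, by simp⟩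
  | cons x t ih =>
    intro a r h
    simp only [List.foldl_cons, pvStep] at h
    by_cases hxa : key x < key a
    · rw [if_pos hxa] at h
      rcases ih x r h with ⟨rfl, hmin⟩ | ⟨hmem, hlt, hmin, l1, l2, hdec, hpre⟩
      · right
        exact ⟨by simp, hxa, by
          intro y hy
          rcases List.mem_cons.1 hy with rfl | hy
          · exact le_refl _
          · exact hmin y hy, [], t, by simp, by simp⟩
      · right
        refine ⟨by simp [hmem], lt_trans hlt hxa, ?_, x :: l1, l2, by simp [hdec], ?_⟩
        · intro y hy
          rcases List.mem_cons.1 hy with rfl | hy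
          · exact le_of_lt hlt
          · exact hmin y hy
        · intro y hy
          rcases List.mem_cons.1 hy with rfl | hy
          · exact hlt
          · exact hpre y hy
    · rw [if_neg hxa] at h
      rcases ih a r h with ⟨rfl, hmin⟩ | ⟨hmem, hlt, hmin, l1, l2, hdec, hpre⟩
      · left
        refine ⟨rfl, ?_⟩
        intro y hy
        rcases List.mem_cons.1 hy with rfl | hy
        · exact not_lt.1 hxa
        · exact hmin y hy
      · right
        refine ⟨by simp [hmem], hlt, ?_, x :: l1, l2, by simp [hdec], ?_⟩
        · intro y hy
          rcases List.mem_cons.1 hy with rfl | hy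
          · exact le_of_lt (lt_of_lt_of_le hlt (not_lt.1 hxa))
          · exact hmin y hy
        · intro y hy
          rcases List.mem_cons.1 hy with rfl | hy
          · exact lt_of_lt_of_le hlt (not_lt.1 hxa)
          · exact hpre y hy

theorem pvFME {α : Type} (key : α → Int) (xs : List α) (r : α) (h : pvFM key xs = some r) :
    r ∈ xs ∧ (∀ y ∈ xs, key r ≤ key y) ∧
      ∃ l1 l2, xs = l1 ++ r :: l2 ∧ ∀ y ∈ l1, key r < key y := by
  cases xs with
  | nil => simp [pvFM] at h
  | cons x t =>
    have h' : t.foldl (pvStep key) (some x) = some r := h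
    rcases pvFME_aux key t x r h' with ⟨rfl, hmin⟩ | ⟨hmem, hlt, hmin, l1, l2, hdec, hpre⟩
    · refine ⟨by simp, ?_, [], t, rfl, by simp⟩
      intro y hy
      rcases List.mem_cons.1 hy with rfl | hy
      · exact le_refl _
      · exact hmin y hy
    · refine ⟨by simp [hmem], ?_, x :: l1, l2, by simp [hdec], ?_⟩
      · intro y hy
        rcases List.mem_cons.1 hy with rfl | hy
        · exact le_of_lt hlt
        · exact hmin y hy
      · intro y hy
        rcases List.mem_cons.1 hy with rfl | hy
        · exact hlt
        · exact hpre y hy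

theorem pvFM_first {α : Type} (key : α → Int) (R : α → α → Prop)
    (hirr : ∀ a, ¬ R a a) (hasym : ∀ a b, R a b → R b a → False)
    (xs : List α) (r : α) (hp : xs.Pairwise R) (h : pvFM key xs = some r) :
    ∀ y ∈ xs, R y r → key r < key y := by
  obtain ⟨-, -, l1, l2, rfl, hpre⟩ := pvFME key xs r h
  intro y hy hR
  rcases List.mem_append.1 hy with hy1 | hy2
  · exact hpre y hy1
  · rcases List.mem_cons.1 hy2 with rfl | hy2
    · exact absurd hR (hirr y)
    · have hR' : R r y := (List.pairwise_cons.1 (List.pairwise_append.1 hp).2.1).1 y hy2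
      exact (hasym y r hR hR').elim

-- ---- head of the stable insertion sort is the first minimum ----

theorem pv_insert_head {α : Type} (key : α → Int) (x : α) (acc : List α) :
    (PySem.List.insertBy (fun a b => decide (key a < key b)) x acc).head? =
      pvStep key acc.head? x := by
  cases acc with
  | nil => rfl
  | cons m t =>
    simp only [PySem.List.insertBy, pvStep, List.head?_cons]
    by_cases h : key x < key m
    · simp [h]
    · simp [h]

theorem pv_sorted_head_aux {α : Type} (key : α → Int) :
    ∀ (xs : List α) (acc : List α),
      (xs.foldl (fun acc x => PySem.List.insertBy (fun a b => decide (key a < key b)) x acc) acc).head? =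
        xs.foldl (pvStep key) acc.head? := by
  intro xs
  induction xs with
  | nil => intro acc; rfl
  | cons x t ih =>
    intro acc
    rw [List.foldl_cons, List.foldl_cons, ih, pv_insert_head]

theorem pv_sorted_head {α : Type} (key : α → Int) (xs : List α) :
    (PySem.List.sorted xs key).head? = pvFM key xs := by
  rw [PySem.List.sorted_eq_foldl_insertBy, pv_sorted_head_aux]
  rfl

-- ---- characterizing A's tried list and B's per-axis search ----

theorem pvO_lt_one (size k s p : Int) (hs : 0 < s) :
    pvO size k s p < 1 ↔ size + 2 * p - 1 * (k - 1) - 1 < 0 := by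
  unfold pvO
  constructor
  · intro h
    have := (PySem.Int.floordiv_lt_iff_lt_mul (a := size + 2 * p - 1 * (k - 1) - 1) (b := s) (q := 0) hs).1 (by omega)
    omega
  · intro h
    have := (PySem.Int.floordiv_lt_iff_lt_mul (a := size + 2 * p - 1 * (k - 1) - 1) (b := s) (q := 0) hs).2 (by omega)
    omega

theorem pv_tried_eq (Hin Win Kh Kw : Int) :
    ((PySem.List.pyRange 1 5 1).foldl (fun acc sh =>
      (PySem.List.pyRange 1 5 1).foldl (fun acc sw =>
        (PySem.List.pyRange 0 5 1).foldl (fun acc ph =>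
          (PySem.List.pyRange 0 5 1).foldl (fun acc pw =>
            if PySem.Int.floordiv (Hin + 2 * ph - 1 * (Kh - 1) - 1) sh + 1 < 1 ∨
               PySem.Int.floordiv (Win + 2 * pw - 1 * (Kw - 1) - 1) sw + 1 < 1 then acc
            else acc ++ [((ph, pw), (sh, sw), ((1 : Int), (1 : Int)),
              PySem.Int.floordiv (Hin + 2 * ph - 1 * (Kh - 1) - 1) sh + 1,
              PySem.Int.floordiv (Win + 2 * pw - 1 * (Kw - 1) - 1) sw + 1)]) acc) acc) acc) []) =
    pvTried Hin Win Kh Kw := by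
  have hr1 : PySem.List.pyRange 1 5 1 = [1, 2, 3, 4] := by decide
  have hr0 : PySem.List.pyRange 0 5 1 = [0, 1, 2, 3, 4] := by decide
  simp only [hr1, hr0,
    show ∀ s p : Int, PySem.Int.floordiv (Hin + 2 * p - 1 * (Kh - 1) - 1) s + 1 = pvO Hin Kh s p
      from fun _ _ => rfl,
    show ∀ s p : Int, PySem.Int.floordiv (Win + 2 * p - 1 * (Kw - 1) - 1) s + 1 = pvO Win Kw s p
      from fun _ _ => rfl]
  rw [show pvTried Hin Win Kh Kw =
      [] ++ ([1, 2, 3, 4] : List Int).flatMap (pvBlockSw Hin Win Kh Kw) from rfl]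
  refine pv_foldl_of_append _ _ _ ?_ []
  intro acc sh hsh
  have hsh' : (0 : Int) < sh := by simp at hsh; omega
  rw [show pvBlockSw Hin Win Kh Kw sh =
      ([1, 2, 3, 4] : List Int).flatMap (pvBlockPh Hin Win Kh Kw sh) from rfl]
  refine pv_foldl_of_append _ _ _ ?_ acc
  intro acc1 sw hsw
  have hsw' : (0 : Int) < sw := by simp at hsw; omega
  refine Eq.trans (pv_foldl_of_append ([0, 1, 2, 3, 4] : List Int) _
    (fun ph => ([0, 1, 2, 3, 4] : List Int).flatMap
      (fun pw => if pvO Hin Kh sh ph < 1 ∨ pvO Win Kw sw pw < 1 then []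
        else [pvMk Hin Win Kh Kw sh sw ph pw])) ?_ acc1) ?_
  · intro acc2 ph _
    refine Eq.trans (pv_foldl_of_append ([0, 1, 2, 3, 4] : List Int) _ _ ?_ acc2) rfl
    intro a pw _
    by_cases hc : pvO Hin Kh sh ph < 1 ∨ pvO Win Kw sw pw < 1
    · rw [if_pos hc, if_pos hc, List.append_nil]
    · rw [if_neg hc, if_neg hc]
      rfl
  · congr 1
    have hL : ∀ ph : Int,
        (([0, 1, 2, 3, 4] : List Int).flatMap
          (fun pw => if pvO Hin Kh sh ph < 1 ∨ pvO Win Kw sw pw < 1 then []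
            else [pvMk Hin Win Kh Kw sh sw ph pw])) =
        if 0 ≤ Hin + 2 * ph - 1 * (Kh - 1) - 1 then pvBlockW Hin Win Kh Kw sh sw ph else [] := by
      intro ph
      by_cases hph : 0 ≤ Hin + 2 * ph - 1 * (Kh - 1) - 1
      · rw [if_pos hph]
        have hc : ∀ pw : Int,
            (if pvO Hin Kh sh ph < 1 ∨ pvO Win Kw sw pw < 1 then ([] : List pvT)
              else [pvMk Hin Win Kh Kw sh sw ph pw]) =
            if 0 ≤ Win + 2 * pw - 1 * (Kw - 1) - 1 then [pvMk Hin Win Kh Kw sh sw ph pw]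
            else [] := by
          intro pw
          by_cases hw : 0 ≤ Win + 2 * pw - 1 * (Kw - 1) - 1
          · rw [if_pos hw,
              if_neg (by simp only [pvO_lt_one _ _ _ _ hsh', pvO_lt_one _ _ _ _ hsw']; omega)]
          · rw [if_neg hw, if_pos (Or.inr ((pvO_lt_one _ _ _ _ hsw').2 (by omega)))]
        simp only [hc]
        rw [pv_flatMap_guard, ← List.map_eq_flatMap]
        rfl
      · rw [if_neg hph]
        have hc : ∀ pw : Int,
            (if pvO Hin Kh sh ph < 1 ∨ pvO Win Kw sw pw < 1 then ([] : List pvT)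
              else [pvMk Hin Win Kh Kw sh sw ph pw]) = [] :=
          fun pw => if_pos (Or.inl ((pvO_lt_one _ _ _ _ hsh').2 (by omega)))
        simp only [hc]
        simp
    simp only [hL]
    rw [pv_flatMap_guard]
    rfl

theorem pv_bestAxis_eq (size k : Int) :
    pvBestAxis size k = pvFM (fun x => x.1) (pvItems size k) := by
  have hr1 : PySem.List.pyRange 1 5 1 = [1, 2, 3, 4] := by decide
  have hr0 : PySem.List.pyRange 0 5 1 = [0, 1, 2, 3, 4] := by decide
  simp only [pvBestAxis, hr1, hr0]
  rw [show pvFM (fun x => x.1) (pvItems size k) =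
      (([1, 2, 3, 4] : List Int).flatMap fun s =>
        (pvVP size k).map fun p => (pvD size k s p, s, p)).foldl
        (pvStep (fun x => x.1)) none from rfl]
  refine pv_foldl_of_blocks _ _ _ _ ?_ none
  intro b s hs
  have hs' : (0 : Int) < s := by simp at hs; omega
  rw [List.foldl_map,
    show pvVP size k = ([0, 1, 2, 3, 4] : List Int).filter
      (fun p => decide (0 ≤ size + 2 * p - 1 * (k - 1) - 1)) from rfl]
  refine pv_foldl_guard _ _ _ _ ?_ b
  intro b' p _
  have hnum : size + 2 * p - k = size + 2 * p - 1 * (k - 1) - 1 := by ring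
  rw [hnum]
  rw [show PySem.Int.floordiv (size + 2 * p - 1 * (k - 1) - 1) s + 1 = pvO size k s p from rfl]
  by_cases h : 0 ≤ size + 2 * p - 1 * (k - 1) - 1
  · rw [if_neg (by rw [pvO_lt_one size k s p hs']; omega), if_pos h]
    cases b' <;> rfl
  · rw [if_pos ((pvO_lt_one size k s p hs').2 (by omega)), if_neg h]

-- ---- Pairwise (loop order) facts ----

theorem pv_vp_pairwise (size k : Int) : (pvVP size k).Pairwise (· < ·) :=
  List.Pairwise.filter _ (by decide : ([0, 1, 2, 3, 4] : List Int).Pairwise (· < ·))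

theorem pv_pairwise_items (size k : Int) : (pvItems size k).Pairwise pvRax := by
  unfold pvItems
  rw [List.pairwise_flatMap]
  constructor
  · intro s _
    rw [List.pairwise_map]
    exact (pv_vp_pairwise size k).imp (fun h => Or.inr ⟨rfl, h⟩)
  · refine List.Pairwise.imp ?_ (by decide : ([1, 2, 3, 4] : List Int).Pairwise (· < ·))
    intro s1 s2 h x hx y hy
    simp only [List.mem_map] at hx hy
    obtain ⟨p, -, rfl⟩ := hx
    obtain ⟨q, -, rfl⟩ := hy
    exact Or.inl h

theorem pv_blockW_comp (Hin Win Kh Kw sh sw ph : Int) (x : pvT)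
    (hx : x ∈ pvBlockW Hin Win Kh Kw sh sw ph) :
    x.2.1.1 = sh ∧ x.2.1.2 = sw ∧ x.1.1 = ph := by
  simp only [pvBlockW, List.mem_map] at hx
  obtain ⟨pw, -, rfl⟩ := hx
  exact ⟨rfl, rfl, rfl⟩

theorem pv_blockPh_comp (Hin Win Kh Kw sh sw : Int) (x : pvT)
    (hx : x ∈ pvBlockPh Hin Win Kh Kw sh sw) :
    x.2.1.1 = sh ∧ x.2.1.2 = sw := by
  simp only [pvBlockPh, List.mem_flatMap] at hx
  obtain ⟨ph, -, hx⟩ := hx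
  exact ⟨(pv_blockW_comp _ _ _ _ _ _ _ _ hx).1, (pv_blockW_comp _ _ _ _ _ _ _ _ hx).2.1⟩

theorem pv_blockSw_comp (Hin Win Kh Kw sh : Int) (x : pvT)
    (hx : x ∈ pvBlockSw Hin Win Kh Kw sh) : x.2.1.1 = sh := by
  simp only [pvBlockSw, List.mem_flatMap] at hx
  obtain ⟨sw, -, hx⟩ := hx
  exact (pv_blockPh_comp _ _ _ _ _ _ _ hx).1

theorem pv_pairwise_tried (Hin Win Kh Kw : Int) :
    (pvTried Hin Win Kh Kw).Pairwise pvR4 := by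
  unfold pvTried
  rw [List.pairwise_flatMap]
  constructor
  · intro sh _
    unfold pvBlockSw
    rw [List.pairwise_flatMap]
    constructor
    · intro sw _
      unfold pvBlockPh
      rw [List.pairwise_flatMap]
      constructor
      · intro ph _
        unfold pvBlockW
        rw [List.pairwise_map]
        exact (pv_vp_pairwise Win Kw).imp
          (fun h => Or.inr ⟨rfl, Or.inr ⟨rfl, Or.inr ⟨rfl, h⟩⟩⟩)
      · refine List.Pairwise.imp ?_ (pv_vp_pairwise Hin Kh)
        intro p1 p2 h x hx y hy
        obtain ⟨hx1, hx2, hx3⟩ := pv_blockW_comp _ _ _ _ _ _ _ _ hx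
        obtain ⟨hy1, hy2, hy3⟩ := pv_blockW_comp _ _ _ _ _ _ _ _ hy
        exact Or.inr ⟨hx1.trans hy1.symm, Or.inr ⟨hx2.trans hy2.symm,
          Or.inl (by omega)⟩⟩
    · refine List.Pairwise.imp ?_ (by decide : ([1, 2, 3, 4] : List Int).Pairwise (· < ·))
      intro sw1 sw2 h x hx y hy
      obtain ⟨hx1, hx2⟩ := pv_blockPh_comp _ _ _ _ _ _ _ hx
      obtain ⟨hy1, hy2⟩ := pv_blockPh_comp _ _ _ _ _ _ _ hy
      exact Or.inr ⟨hx1.trans hy1.symm, Or.inl (by omega)⟩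
  · refine List.Pairwise.imp ?_ (by decide : ([1, 2, 3, 4] : List Int).Pairwise (· < ·))
    intro sh1 sh2 h x hx y hy
    have hx1 := pv_blockSw_comp _ _ _ _ _ _ hx
    have hy1 := pv_blockSw_comp _ _ _ _ _ _ hy
    exact Or.inl (by omega)

-- ---- membership helpers ----

theorem pv_mem_items (size k s p : Int) (hs : s ∈ ([1, 2, 3, 4] : List Int))
    (hp : p ∈ pvVP size k) : (pvD size k s p, s, p) ∈ pvItems size k := by
  unfold pvItems
  simp only [List.mem_flatMap, List.mem_map]
  exact ⟨s, hs, p, hp, rfl⟩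

theorem pv_items_shape (size k : Int) (y : Int × Int × Int) (hy : y ∈ pvItems size k) :
    ∃ s, s ∈ ([1, 2, 3, 4] : List Int) ∧ ∃ p, p ∈ pvVP size k ∧ y = (pvD size k s p, s, p) := by
  unfold pvItems at hy
  simp only [List.mem_flatMap, List.mem_map] at hy
  obtain ⟨s, hs, p, hp, rfl⟩ := hy
  exact ⟨s, hs, p, hp, rfl⟩

theorem pv_mem_tried (Hin Win Kh Kw sh sw ph pw : Int)
    (hsh : sh ∈ ([1, 2, 3, 4] : List Int)) (hsw : sw ∈ ([1, 2, 3, 4] : List Int))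
    (hph : ph ∈ pvVP Hin Kh) (hpw : pw ∈ pvVP Win Kw) :
    pvMk Hin Win Kh Kw sh sw ph pw ∈ pvTried Hin Win Kh Kw := by
  unfold pvTried pvBlockSw pvBlockPh pvBlockW
  simp only [List.mem_flatMap, List.mem_map]
  exact ⟨sh, hsh, sw, hsw, ph, hph, pw, hpw, rfl⟩

theorem pv_tried_shape (Hin Win Kh Kw : Int) (y : pvT) (hy : y ∈ pvTried Hin Win Kh Kw) :
    ∃ sh, sh ∈ ([1, 2, 3, 4] : List Int) ∧ ∃ sw, sw ∈ ([1, 2, 3, 4] : List Int) ∧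
      ∃ ph, ph ∈ pvVP Hin Kh ∧ ∃ pw, pw ∈ pvVP Win Kw ∧
        y = pvMk Hin Win Kh Kw sh sw ph pw := by
  unfold pvTried pvBlockSw pvBlockPh pvBlockW at hy
  simp only [List.mem_flatMap, List.mem_map] at hy
  obtain ⟨sh, hsh, sw, hsw, ph, hph, pw, hpw, rfl⟩ := hy
  exact ⟨sh, hsh, sw, hsw, ph, hph, pw, hpw, rfl⟩

-- ---- main proof ----

theorem pv_main (Hin Win Kh Kw : Int) (hpre : Pre_infer_unfold_params_py Hin Win Kh Kw) :
    infer_unfold_params_py Hin Win Kh Kw = infer_unfold_params_py_alt Hin Win Kh Kw := by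
  obtain ⟨hH, hW⟩ := hpre
  have h4H : (4 : Int) ∈ pvVP Hin Kh := by simp [pvVP]; omega
  have h4W : (4 : Int) ∈ pvVP Win Kw := by simp [pvVP]; omega
  have hRaxirr : ∀ a : Int × Int × Int, ¬ pvRax a a := by intro a; unfold pvRax; omega
  have hRaxasym : ∀ a b : Int × Int × Int, pvRax a b → pvRax b a → False := by
    intro a b; unfold pvRax; omega
  -- height axis
  have hneH : ∃ r, pvFM (fun x : Int × Int × Int => x.1) (pvItems Hin Kh) = some r := by
    cases hI : pvItems Hin Kh with
    | nil =>
      exfalso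
      have hm := pv_mem_items Hin Kh 1 4 (by norm_num) h4H
      rw [hI] at hm
      simp at hm
    | cons x t => exact pvFM_isSome _ t x
  obtain ⟨mh, hFMH⟩ := hneH
  obtain ⟨hmemH, hminH, -⟩ := pvFME _ _ _ hFMH
  have hfirstH := pvFM_first (fun x : Int × Int × Int => x.1) pvRax hRaxirr hRaxasym
    _ _ (pv_pairwise_items Hin Kh) hFMH
  obtain ⟨sH, hsH, pH, hpH, hmh⟩ := pv_items_shape Hin Kh mh hmemH
  subst hmh
  -- width axis
  have hneW : ∃ r, pvFM (fun x : Int × Int × Int => x.1) (pvItems Win Kw) = some r := by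
    cases hI : pvItems Win Kw with
    | nil =>
      exfalso
      have hm := pv_mem_items Win Kw 1 4 (by norm_num) h4W
      rw [hI] at hm
      simp at hm
    | cons x t => exact pvFM_isSome _ t x
  obtain ⟨mw, hFMW⟩ := hneW
  obtain ⟨hmemW, hminW, -⟩ := pvFME _ _ _ hFMW
  have hfirstW := pvFM_first (fun x : Int × Int × Int => x.1) pvRax hRaxirr hRaxasym
    _ _ (pv_pairwise_items Win Kw) hFMW
  obtain ⟨sW, hsW, pW, hpW, hmw⟩ := pv_items_shape Win Kw mw hmemW
  subst hmw
  -- A's first minimum over the whole 4-fold loop is the combined per-axis pair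
  have hFMT : pvFM (pvKeyA Hin Win) (pvTried Hin Win Kh Kw) =
      some (pvMk Hin Win Kh Kw sH sW pH pW) := by
    refine pvFMU _ pvR4 _ _ (pv_pairwise_tried Hin Win Kh Kw)
      (pv_mem_tried Hin Win Kh Kw sH sW pH pW hsH hsW hpH hpW) ?_ ?_
    · intro y hy
      obtain ⟨sh, hsh, sw, hsw, ph, hph, pw, hpw, rfl⟩ := pv_tried_shape Hin Win Kh Kw y hy
      have h1 : pvD Hin Kh sH pH ≤ pvD Hin Kh sh ph :=
        hminH _ (pv_mem_items Hin Kh sh ph hsh hph)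
      have h2 : pvD Win Kw sW pW ≤ pvD Win Kw sw pw :=
        hminW _ (pv_mem_items Win Kw sw pw hsw hpw)
      show pvD Hin Kh sH pH + pvD Win Kw sW pW ≤ pvD Hin Kh sh ph + pvD Win Kw sw pw
      omega
    · intro y hy hR
      obtain ⟨sh, hsh, sw, hsw, ph, hph, pw, hpw, rfl⟩ := pv_tried_shape Hin Win Kh Kw y hy
      have h1 : pvD Hin Kh sH pH ≤ pvD Hin Kh sh ph :=
        hminH _ (pv_mem_items Hin Kh sh ph hsh hph)
      have h2 : pvD Win Kw sW pW ≤ pvD Win Kw sw pw :=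
        hminW _ (pv_mem_items Win Kw sw pw hsw hpw)
      show pvD Hin Kh sH pH + pvD Win Kw sW pW < pvD Hin Kh sh ph + pvD Win Kw sw pw
      simp only [pvR4, pvMk] at hR
      rcases hR with h | ⟨he1, h | ⟨he2, h | ⟨he3, h⟩⟩⟩
      · have h3 : pvD Hin Kh sH pH < pvD Hin Kh sh ph :=
          hfirstH _ (pv_mem_items Hin Kh sh ph hsh hph) (Or.inl h)
        omega
      · have h3 : pvD Win Kw sW pW < pvD Win Kw sw pw :=
          hfirstW _ (pv_mem_items Win Kw sw pw hsw hpw) (Or.inl h)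
        omega
      · have h3 : pvD Hin Kh sH pH < pvD Hin Kh sh ph :=
          hfirstH _ (pv_mem_items Hin Kh sh ph hsh hph) (Or.inr ⟨he1, h⟩)
        omega
      · have h3 : pvD Win Kw sW pW < pvD Win Kw sw pw :=
          hfirstW _ (pv_mem_items Win Kw sw pw hsw hpw) (Or.inr ⟨he2, h⟩)
        omega
  -- B's value
  have hBH : pvBestAxis Hin Kh = some (pvD Hin Kh sH pH, sH, pH) := by
    rw [pv_bestAxis_eq]; exact hFMH
  have hBW : pvBestAxis Win Kw = some (pvD Win Kw sW pW, sW, pW) := by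
    rw [pv_bestAxis_eq]; exact hFMW
  have hAlt : infer_unfold_params_py_alt Hin Win Kh Kw = ((pH, pW), (sH, sW), (1, 1)) := by
    unfold infer_unfold_params_py_alt
    rw [hBH, hBW]
  -- A's value
  have hhead : (PySem.List.sorted (pvTried Hin Win Kh Kw) (pvKeyA Hin Win)).head? =
      some (pvMk Hin Win Kh Kw sH sW pH pW) := by
    rw [pv_sorted_head]; exact hFMT
  obtain ⟨rest, hS⟩ : ∃ rest, PySem.List.sorted (pvTried Hin Win Kh Kw) (pvKeyA Hin Win) =
      pvMk Hin Win Kh Kw sH sW pH pW :: rest := by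
    cases hS : PySem.List.sorted (pvTried Hin Win Kh Kw) (pvKeyA Hin Win) with
    | nil => rw [hS] at hhead; simp at hhead
    | cons a t =>
      rw [hS] at hhead
      simp only [List.head?_cons, Option.some.injEq] at hhead
      exact ⟨t, by rw [hhead]⟩
  rw [hAlt]
  simp only [infer_unfold_params_py]
  rw [pv_tried_eq Hin Win Kh Kw,
    show (fun t : pvT => |t.2.2.2.1 - PySem.Int.floordiv Hin 2| +
      |t.2.2.2.2 - PySem.Int.floordiv Win 2|) = pvKeyA Hin Win from rfl, hS]
  rfl

-- ===== VERDICT (by name: the statement is the Claim_ definition above) =====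
theorem infer_unfold_params_py_spec : Claim_equal_infer_unfold_params_py := by
  intro Hin Win Kh Kw _ hpre
  show infer_unfold_params_py Hin Win Kh Kw = infer_unfold_params_py_alt Hin Win Kh Kw
  exact pv_main Hin Win Kh Kw hpre
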